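-- pv_equiv track=rewrite | github.com/HyperionGray/pf-web-poly-compile-helper-runner | pf-runner/pf_shell.py | _has_shell_metacharacters
-- ===== SOURCE A (Python) =====
-- def _has_shell_metacharacters(cmd: str) -> bool:
--     """
--     Check if command contains shell metacharacters that require shell features.
--
--     Shell features include: pipes, redirects, variable expansion, command substitution,
--     wildcards, subshells, etc.
--
--     Returns:
--         True if shell features are detected, False otherwise
--     """
--     # Comprehensive list of shell metacharacters and features
--     shell_chars = [
--         '|', '>', '<', '&', ';', '`', '$',  # Basic operators
--         '&&', '||', '>>', '<<', '2>', '2>&1',  # Compound operators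
--         '*', '?', '[', ']', '{', '}',  # Wildcards and brace expansion
--         '~', '(', ')',  # Home expansion and subshells
--         '\n'  # Command chaining with newlines
--     ]
--     return any(char in cmd for char in shell_chars)
-- ===== SOURCE B (Python) =====
-- # Single pass over the command's characters against a frozenset of the
-- # single-character metacharacters; every multi-char pattern of the original
-- # (&&, ||, >>, <<, 2>, 2>&1) contains one of these, so one scan suffices.
-- _METACHARS = frozenset('|><&;`$*?[]{}~()\n')
--
-- def _has_shell_metacharacters(cmd: str) -> bool:
--     return any(c in _METACHARS for c in cmd)
-- ===== Notes on version B (the rewrite author's own statement) =====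
-- stated objective: simpler
-- what changed: Replaces 23 substring scans of cmd (one per pattern, including redundant multi-char patterns like '&&' and '2>&1' that are subsumed by their single characters) with a single pass over cmd's characters testing membership in a frozenset of the 17 single-character metacharacters.
import Mathlib
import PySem

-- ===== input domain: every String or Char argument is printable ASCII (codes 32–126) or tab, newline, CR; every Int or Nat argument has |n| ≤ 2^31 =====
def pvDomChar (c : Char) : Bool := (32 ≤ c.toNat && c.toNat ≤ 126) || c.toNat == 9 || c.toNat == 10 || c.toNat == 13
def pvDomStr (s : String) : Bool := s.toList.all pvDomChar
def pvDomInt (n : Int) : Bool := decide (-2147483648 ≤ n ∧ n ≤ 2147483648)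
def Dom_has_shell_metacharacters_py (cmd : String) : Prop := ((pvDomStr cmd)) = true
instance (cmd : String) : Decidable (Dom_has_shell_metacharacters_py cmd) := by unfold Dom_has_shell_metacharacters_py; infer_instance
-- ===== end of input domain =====

-- B replaces A's 23 substring scans of cmd with one pass over cmd's characters
-- against a set of the single-character metacharacters (objective: simpler).


-- ===== PORT A =====
-- the Python list literal `shell_chars`
def pvShellChars : List String :=
  ["|", ">", "<", "&", ";", "`", "$",
   "&&", "||", ">>", "<<", "2>", "2>&1",
   "*", "?", "[", "]", "{", "}",
   "~", "(", ")",
   "\n"]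

-- any(char in cmd for char in shell_chars)
def has_shell_metacharacters_py (cmd : String) : Bool :=
  pvShellChars.any (fun ch => PySem.Str.isIn ch cmd)

-- ===== PORT B =====
-- _METACHARS = frozenset('|><&;`$*?[]{}~()\n')
def pvMetaChars : PySem.Set Char := PySem.Set.ofList "|><&;`$*?[]{}~()\n".toList

-- any(c in _METACHARS for c in cmd)
def has_shell_metacharacters_py_alt (cmd : String) : Bool :=
  cmd.toList.any (fun c => pvMetaChars.contains c)

-- ===== PRECONDITION & SPEC =====
def Spec_has_shell_metacharacters_py (cmd : String) (out : Bool) : Prop := out = has_shell_metacharacters_py_alt cmd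
instance (cmd : String) (out : Bool) : Decidable (Spec_has_shell_metacharacters_py cmd out) := by unfold Spec_has_shell_metacharacters_py; infer_instance

-- ===== CLAIM (what is proved, stated in full; the proofs are below) =====
def Claim_equal_has_shell_metacharacters_py : Prop := ∀ (cmd : String), Dom_has_shell_metacharacters_py cmd → Spec_has_shell_metacharacters_py cmd (has_shell_metacharacters_py cmd)

-- ===== LEMMAS AND PROOFS =====

theorem set_contains_iff {α : Type} [BEq α] [LawfulBEq α] (s : PySem.Set α) (x : α) :
    s.contains x = true ↔ x ∈ s := by
  unfold PySem.Set.contains; exact List.contains_iff_mem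

-- every pattern of A contains at least one single-char metacharacter of B
theorem pat_has_meta : ∀ p ∈ pvShellChars, ∃ x ∈ p.toList, x ∈ pvMetaChars := by
  have h : pvShellChars.all (fun p => p.toList.any fun x => pvMetaChars.contains x) = true := by
    decide
  intro p hp
  obtain ⟨x, hx, hc⟩ := List.any_eq_true.mp (List.all_eq_true.mp h p hp)
  exact ⟨x, hx, (set_contains_iff _ _).mp hc⟩

-- every single-char metacharacter of B is itself one of A's patterns
theorem meta_has_pat : ∀ c ∈ pvMetaChars, ∃ s ∈ pvShellChars, s.toList = [c] := by
  have h : (pvMetaChars : List Char).all (fun c => pvShellChars.any fun s => s.toList == [c]) = true := by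
    decide
  intro c hc
  obtain ⟨s, hs, he⟩ := List.any_eq_true.mp (List.all_eq_true.mp h c hc)
  exact ⟨s, hs, beq_iff_eq.mp he⟩

-- ===== VERDICT (by name: the statement is the Claim_ definition above) =====
theorem has_shell_metacharacters_py_spec : Claim_equal_has_shell_metacharacters_py := by
  intro cmd _
  unfold Spec_has_shell_metacharacters_py
  rw [Bool.eq_iff_iff]
  simp only [has_shell_metacharacters_py, has_shell_metacharacters_py_alt,
    List.any_eq_true, PySem.Str.isIn_iff_infix, set_contains_iff]
  constructor
  · rintro ⟨p, hp, hinf⟩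
    obtain ⟨x, hxp, hxM⟩ := pat_has_meta p hp
    exact ⟨x, hinf.subset hxp, hxM⟩
  · rintro ⟨c, hc, hcM⟩
    obtain ⟨s, hs, hseq⟩ := meta_has_pat c hcM
    exact ⟨s, hs, by rw [hseq]; exact (List.singleton_infix_iff c cmd.toList).mpr hc⟩
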